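-- pv_equiv track=rewrite | github.com/olgaobiols/sbc_cbr_i_recomanacio | src/main_debug.py | _parelles_detectades
-- ===== SOURCE A (Python) =====
-- from typing import List, Set, Dict, Any, Optional, Tuple
--
-- def _normalize_item(value: str) -> str:
--     if not value:
--         return ""
--     text = str(value).strip().lower()
--     return " ".join(text.replace("-", " ").replace("_", " ").split())
--
-- def _parelles_detectades(ingredients: List[str], parelles_vetades: Set[str]) -> List[str]:
--     if not parelles_vetades:
--         return []
--     norm_ings = [_normalize_item(i) for i in ingredients if i]
--     found = []
--     for i in range(len(norm_ings)):
--         for j in range(i + 1, len(norm_ings)):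
--             key = "|".join(sorted([norm_ings[i], norm_ings[j]]))
--             if key in parelles_vetades:
--                 found.append(key)
--     return found
-- ===== SOURCE B (Python) =====
-- # Group equal normalized ingredients by value: enumerate banned checks once per
-- # DISTINCT value pair, expand each banned pair to its index pairs, sort by (i, j).
-- def _normalize_item(value: str) -> str:
--     if not value:
--         return ""
--     text = str(value).strip().lower()
--     return " ".join(text.replace("-", " ").replace("_", " ").split())
--
-- def _parelles_detectades(ingredients, parelles_vetades):
--     if not parelles_vetades:
--         return []
--     norm = [_normalize_item(i) for i in ingredients if i]
--     vals = list(dict.fromkeys(norm))          # distinct values, first occurrence order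
--     positions = [[i for i in range(len(norm)) if norm[i] == u] for u in vals]
--     hits = []
--     for a in range(len(vals)):
--         for b in range(a, len(vals)):
--             u, v = vals[a], vals[b]
--             key = u + "|" + v if u <= v else v + "|" + u
--             if key in parelles_vetades:
--                 pu, pv = positions[a], positions[b]
--                 if a == b:
--                     for x in range(len(pu)):
--                         for y in range(x + 1, len(pu)):
--                             hits.append((pu[x], pu[y]))
--                 else:
--                     for i in pu:
--                         for j in pv:
--                             hits.append((i, j) if i < j else (j, i))
--     hits.sort()
--     out = []
--     for i, j in hits:
--         u, v = norm[i], norm[j]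
--         out.append(u + "|" + v if u <= v else v + "|" + u)
--     return out
-- ===== Notes on version B (the rewrite author's own statement) =====
-- stated objective: faster
-- what changed: Instead of testing every index pair, B groups equal normalized ingredients (distinct values + their position lists), performs one banned-key test per distinct value pair, expands each banned value pair into its index pairs, and sorts those by (i,j) to restore A's enumeration order.
import Mathlib
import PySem

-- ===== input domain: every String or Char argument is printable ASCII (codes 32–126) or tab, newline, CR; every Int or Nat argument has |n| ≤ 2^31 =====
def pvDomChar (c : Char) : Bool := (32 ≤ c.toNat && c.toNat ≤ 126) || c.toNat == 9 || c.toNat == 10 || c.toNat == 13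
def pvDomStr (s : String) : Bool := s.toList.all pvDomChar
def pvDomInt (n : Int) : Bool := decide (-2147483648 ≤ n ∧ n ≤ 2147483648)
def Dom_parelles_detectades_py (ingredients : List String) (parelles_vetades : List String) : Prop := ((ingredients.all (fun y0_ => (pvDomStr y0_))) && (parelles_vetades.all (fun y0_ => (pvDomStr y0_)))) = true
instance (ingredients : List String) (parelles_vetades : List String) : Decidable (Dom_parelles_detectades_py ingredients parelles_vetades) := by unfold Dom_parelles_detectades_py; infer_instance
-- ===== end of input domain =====

-- B replaces A's scan over all index pairs by grouping equal normalized values: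
-- one banned-key test per distinct value pair, expanded to index pairs and sorted by (i, j).

-- ===== PORT A =====
-- shared helper: Python `_normalize_item` (used verbatim by both sources)
def normalizeItem (value : String) : String :=
  if value = "" then ""
  else
    let text := PySem.Str.lower (PySem.Str.strip value)
    PySem.Str.join " " (PySem.Str.split₀ (PySem.Str.replace (PySem.Str.replace text "-" " ") "_" " "))

def parelles_detectades_py (ingredients : List String) (parelles_vetades : List String) : List String :=
  if parelles_vetades = [] then []
  else
    let norm := (ingredients.filter (fun i => i != "")).map normalizeItem
    (PySem.List.pyRange 0 (PySem.List.len norm) 1).foldl (fun found i =>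
      (PySem.List.pyRange (i + 1) (PySem.List.len norm) 1).foldl (fun found j =>
        let key := PySem.Str.join "|" (PySem.List.sorted
          [PySem.List.pyGetD norm i "", PySem.List.pyGetD norm j ""] (fun x => x))
        if PySem.Set.contains parelles_vetades key then found ++ [key] else found) found) []

-- ===== PORT B =====
-- B's key expression `u + "|" + v if u <= v else v + "|" + u`
def pkey (u v : String) : String := if u ≤ v then u ++ "|" ++ v else v ++ "|" ++ u

def parelles_detectades_py_alt (ingredients : List String) (parelles_vetades : List String) : List String :=
  if parelles_vetades = [] then []
  else
    let norm := (ingredients.filter (fun i => i != "")).map normalizeItem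
    let vals := PySem.List.dedup norm
    let positions := vals.map (fun u =>
      (PySem.List.pyRange 0 (PySem.List.len norm) 1).filter (fun i => PySem.List.pyGetD norm i "" == u))
    let hits := (PySem.List.pyRange 0 (PySem.List.len vals) 1).foldl (fun hits a =>
      (PySem.List.pyRange a (PySem.List.len vals) 1).foldl (fun hits b =>
        let u := PySem.List.pyGetD vals a ""
        let v := PySem.List.pyGetD vals b ""
        let key := pkey u v
        if PySem.Set.contains parelles_vetades key then
          let pu := PySem.List.pyGetD positions a []
          let pv := PySem.List.pyGetD positions b []
          if a == b then
            (PySem.List.pyRange 0 (PySem.List.len pu) 1).foldl (fun hits x =>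
              (PySem.List.pyRange (x + 1) (PySem.List.len pu) 1).foldl (fun hits y =>
                hits ++ [(PySem.List.pyGetD pu x 0, PySem.List.pyGetD pu y 0)]) hits) hits
          else
            pu.foldl (fun hits i =>
              pv.foldl (fun hits j =>
                hits ++ [if i < j then (i, j) else (j, i)]) hits) hits
        else hits) hits) ([] : List (Int × Int))
    let sortedHits := PySem.List.sorted2 hits Prod.fst Prod.snd
    sortedHits.foldl (fun out p =>
      out ++ [pkey (PySem.List.pyGetD norm p.1 "") (PySem.List.pyGetD norm p.2 "")]) []

-- ===== PRECONDITION & SPEC =====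
def Spec_parelles_detectades_py (ingredients : List String) (parelles_vetades : List String) (out : List String) : Prop := out = parelles_detectades_py_alt ingredients parelles_vetades
instance (ingredients : List String) (parelles_vetades : List String) (out : List String) : Decidable (Spec_parelles_detectades_py ingredients parelles_vetades out) := by unfold Spec_parelles_detectades_py; infer_instance

-- ===== CLAIM (what is proved, stated in full; the proofs are below) =====
def Claim_equal_parelles_detectades_py : Prop := ∀ (ingredients : List String) (parelles_vetades : List String), Dom_parelles_detectades_py ingredients parelles_vetades → Spec_parelles_detectades_py ingredients parelles_vetades (parelles_detectades_py ingredients parelles_vetades)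

-- ===== LEMMAS AND PROOFS =====

-- `ns` below always stands for the list of normalized non-empty ingredients
-- (the same value in both ports), `pvs` for the banned set.

-- ns[i] (indices produced by the loops are always in range)
def nsGet (ns : List String) (i : Int) : String := PySem.List.pyGetD ns i ""

-- A's key for the index pair p
def keyAt (ns : List String) (p : Int × Int) : String := pkey (nsGet ns p.1) (nsGet ns p.2)

-- the index pairs A enumerates and keeps, in A's order
def keptPairs (ns pvs : List String) : List (Int × Int) :=
  (PySem.List.pyRange 0 (ns.length : Int) 1).flatMap (fun i =>
    ((PySem.List.pyRange (i + 1) (ns.length : Int) 1).filter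
      (fun j => PySem.Set.contains pvs (keyAt ns (i, j)))).map (fun j => (i, j)))

-- positions of value u among ns, ascending
def posOf (ns : List String) (u : String) : List Int :=
  (PySem.List.pyRange 0 (ns.length : Int) 1).filter (fun i => nsGet ns i == u)

def samePairs (pu : List Int) : List (Int × Int) :=
  (PySem.List.pyRange 0 (pu.length : Int) 1).flatMap (fun x =>
    (PySem.List.pyRange (x + 1) (pu.length : Int) 1).map (fun y =>
      (PySem.List.pyGetD pu x 0, PySem.List.pyGetD pu y 0)))

def crossPairs (pu pw : List Int) : List (Int × Int) :=
  pu.flatMap (fun i => pw.map (fun j => if i < j then (i, j) else (j, i)))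

def valGet (ns : List String) (a : Int) : String := PySem.List.pyGetD (PySem.List.dedup ns) a ""

def contrib (ns pvs : List String) (a b : Int) : List (Int × Int) :=
  if PySem.Set.contains pvs (pkey (valGet ns a) (valGet ns b)) then
    if a = b then samePairs (posOf ns (valGet ns a))
    else crossPairs (posOf ns (valGet ns a)) (posOf ns (valGet ns b))
  else []

def hitsOf (ns pvs : List String) : List (Int × Int) :=
  (PySem.List.pyRange 0 ((PySem.List.dedup ns).length : Int) 1).flatMap (fun a =>
    (PySem.List.pyRange a ((PySem.List.dedup ns).length : Int) 1).flatMap (fun b =>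
      contrib ns pvs a b))

-- ---- small facts about keys ----
lemma sorted_pair (a b : String) :
    PySem.List.sorted [a, b] (fun x => x) = if b < a then [b, a] else [a, b] := by
  simp [PySem.List.sorted, PySem.List.insertBy]


lemma join_pair (a b : String) : PySem.Str.join "|" [a, b] = a ++ "|" ++ b := by
  rw [← String.toList_inj]
  simp [PySem.Str.toList_join, PySem.Chars.join_cons_cons, PySem.Chars.join_singleton]


lemma keyA_eq_pkey (a b : String) :
    PySem.Str.join "|" (PySem.List.sorted [a, b] (fun x => x)) = pkey a b := by
  rw [sorted_pair]; unfold pkey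
  by_cases h : a ≤ b
  · rw [if_neg (not_lt.mpr h), if_pos h, join_pair]
  · rw [if_pos (not_le.mp h), if_neg h, join_pair]


lemma pkey_comm (u v : String) : pkey u v = pkey v u := by
  unfold pkey
  rcases lt_trichotomy u v with h | h | h
  · rw [if_pos h.le, if_neg (not_le.mpr h)]
  · subst h; rfl
  · rw [if_neg (not_le.mpr h), if_pos h.le]


-- ---- A's loop in closed form ----
lemma A_shape (ns pvs : List String) :
    (PySem.List.pyRange 0 (PySem.List.len ns) 1).foldl (fun found i =>
      (PySem.List.pyRange (i + 1) (PySem.List.len ns) 1).foldl (fun found j =>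
        let key := PySem.Str.join "|" (PySem.List.sorted
          [PySem.List.pyGetD ns i "", PySem.List.pyGetD ns j ""] (fun x => x))
        if PySem.Set.contains pvs key then found ++ [key] else found) found) []
    = (keptPairs ns pvs).map (keyAt ns) := by
  simp only [PySem.List.len_eq, PySem.List.foldl_append_if, PySem.List.foldl_append_eq_flatMap,
    List.nil_append, keptPairs, List.map_flatMap, List.map_map, keyA_eq_pkey, keyAt, nsGet,
    Function.comp_def]


-- ---- membership / order facts ----
lemma mem_keptPairs (ns pvs : List String) (p : Int × Int) :
    p ∈ keptPairs ns pvs ↔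
      0 ≤ p.1 ∧ p.1 < p.2 ∧ p.2 < (ns.length : Int) ∧
      PySem.Set.contains pvs (keyAt ns p) = true := by
  rcases p with ⟨i, j⟩
  simp only [keptPairs, List.mem_flatMap, List.mem_map, List.mem_filter,
    PySem.List.mem_pyRange_one]
  constructor
  · rintro ⟨i', ⟨h0, h1⟩, j', ⟨⟨h2, h3⟩, hc⟩, heq⟩
    obtain ⟨rfl, rfl⟩ := Prod.mk.injEq .. ▸ heq
    exact ⟨h0, by omega, h3, hc⟩
  · rintro ⟨h0, h12, h2n, hc⟩
    exact ⟨i, ⟨h0, by omega⟩, j, ⟨⟨by omega, h2n⟩, hc⟩, rfl⟩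


lemma pairwise_keptPairs (ns pvs : List String) :
    (keptPairs ns pvs).Pairwise (fun p q => toLex p < toLex q) := by
  unfold keptPairs
  rw [List.pairwise_flatMap]
  constructor
  · intro i _
    rw [List.pairwise_map]
    refine List.Pairwise.imp ?_ ((PySem.List.pairwise_lt_pyRange_one _ _).filter _)
    intro a b h
    exact Prod.Lex.toLex_lt_toLex.mpr (Or.inr ⟨rfl, h⟩)
  · refine (PySem.List.pairwise_lt_pyRange_one _ _).imp ?_
    intro i1 i2 h x hx y hy
    simp only [List.mem_map] at hx hy
    obtain ⟨j1, -, rfl⟩ := hx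
    obtain ⟨j2, -, rfl⟩ := hy
    exact Prod.Lex.toLex_lt_toLex.mpr (Or.inl h)


lemma mem_posOf (ns : List String) (u : String) (i : Int) :
    i ∈ posOf ns u ↔ 0 ≤ i ∧ i < (ns.length : Int) ∧ nsGet ns i = u := by
  simp [posOf, List.mem_filter, PySem.List.mem_pyRange_one, nsGet, and_assoc]


lemma pairwise_posOf (ns : List String) (u : String) : (posOf ns u).Pairwise (· < ·) := by
  exact (PySem.List.pairwise_lt_pyRange_one _ _).filter _


lemma indices_of_sorted_mem {l : List Int} (hl : l.Pairwise (· < ·)) {i j : Int}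
    (hi : i ∈ l) (hj : j ∈ l) (hij : i < j) :
    ∃ (x y : Nat) (hx : x < l.length) (hy : y < l.length), x < y ∧ l[x] = i ∧ l[y] = j := by
  obtain ⟨x, hx, hxe⟩ := List.getElem_of_mem hi
  obtain ⟨y, hy, hye⟩ := List.getElem_of_mem hj
  have hpw := List.pairwise_iff_getElem.mp hl
  refine ⟨x, y, hx, hy, ?_, hxe, hye⟩
  rcases lt_trichotomy x y with h | h | h
  · exact h
  · subst h; rw [hxe] at hye; omega
  · have := hpw y x hy hx h
    rw [hxe, hye] at this; omega


lemma mem_samePairs {pu : List Int} (hpu : pu.Pairwise (· < ·)) (p : Int × Int) :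
    p ∈ samePairs pu ↔ p.1 ∈ pu ∧ p.2 ∈ pu ∧ p.1 < p.2 := by
  rcases p with ⟨i, j⟩
  simp only [samePairs, List.mem_flatMap, List.mem_map, PySem.List.mem_pyRange_one]
  constructor
  · rintro ⟨x, ⟨hx0, hx1⟩, y, ⟨hy0, hy1⟩, heq⟩
    obtain ⟨rfl, rfl⟩ := Prod.mk.injEq .. ▸ heq
    have hxl : x.toNat < pu.length := by omega
    have hyl : y.toNat < pu.length := by omega
    rw [PySem.List.pyGetD_eq_getElem pu 0 hx0 (by omega),
        PySem.List.pyGetD_eq_getElem pu 0 (by omega : (0:Int) ≤ y) (by omega)]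
    refine ⟨List.getElem_mem _, List.getElem_mem _, ?_⟩
    exact List.pairwise_iff_getElem.mp hpu x.toNat y.toNat hxl hyl (by omega)
  · rintro ⟨hi, hj, hij⟩
    obtain ⟨x, y, hx, hy, hxy, hxe, hye⟩ := indices_of_sorted_mem hpu hi hj hij
    refine ⟨(x : Int), ⟨by omega, by exact_mod_cast hx⟩,
            (y : Int), ⟨by exact_mod_cast hxy, by exact_mod_cast hy⟩, ?_⟩
    rw [PySem.List.pyGetD_eq_getElem pu 0 (by omega) (by exact_mod_cast hx),
        PySem.List.pyGetD_eq_getElem pu 0 (by omega) (by exact_mod_cast hy)]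
    simp only [Int.toNat_natCast, hxe, hye]


lemma mem_crossPairs (pu pw : List Int) (p : Int × Int) :
    p ∈ crossPairs pu pw ↔ ∃ i ∈ pu, ∃ j ∈ pw, p = if i < j then (i, j) else (j, i) := by
  simp only [crossPairs, List.mem_flatMap, List.mem_map]
  constructor
  · rintro ⟨i, hi, j, hj, rfl⟩; exact ⟨i, hi, j, hj, rfl⟩
  · rintro ⟨i, hi, j, hj, rfl⟩; exact ⟨i, hi, j, hj, rfl⟩



-- ---- dedup / value-index facts ----
lemma mem_dedup (ns : List String) (u : String) : u ∈ PySem.List.dedup ns ↔ u ∈ ns :=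
  PySem.Set.mem_ofList ns u

lemma nodup_dedup (ns : List String) : (PySem.List.dedup ns).Nodup :=
  PySem.Set.nodup_ofList ns

lemma nsGet_mem (ns : List String) {i : Int} (h0 : 0 ≤ i) (h1 : i < (ns.length : Int)) :
    nsGet ns i ∈ ns := by
  rw [nsGet, PySem.List.pyGetD_eq_getElem _ _ h0 (by exact_mod_cast h1)]
  exact List.getElem_mem _

lemma valGet_eq (ns : List String) {a : Int} (h0 : 0 ≤ a)
    (h1 : a.toNat < (PySem.List.dedup ns).length) :
    valGet ns a = (PySem.List.dedup ns)[a.toNat] :=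
  PySem.List.pyGetD_eq_getElem _ _ h0 (by omega)

lemma valGet_inj (ns : List String) {a b : Int} (ha0 : 0 ≤ a)
    (ha1 : a < ((PySem.List.dedup ns).length : Int)) (hb0 : 0 ≤ b)
    (hb1 : b < ((PySem.List.dedup ns).length : Int))
    (h : valGet ns a = valGet ns b) : a = b := by
  rw [valGet_eq ns ha0 (by omega), valGet_eq ns hb0 (by omega)] at h
  have := ((nodup_dedup ns).getElem_inj_iff).mp h
  omega

-- ---- contrib membership ----
lemma mem_contrib_iff (ns pvs : List String) {a b : Int} (ha0 : 0 ≤ a) (hab : a ≤ b)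
    (hbm : b < ((PySem.List.dedup ns).length : Int)) (p : Int × Int) :
    p ∈ contrib ns pvs a b ↔
      (PySem.Set.contains pvs (pkey (valGet ns a) (valGet ns b)) = true ∧
       0 ≤ p.1 ∧ p.1 < p.2 ∧ p.2 < (ns.length : Int) ∧
       ((nsGet ns p.1 = valGet ns a ∧ nsGet ns p.2 = valGet ns b) ∨
        (nsGet ns p.1 = valGet ns b ∧ nsGet ns p.2 = valGet ns a))) := by
  unfold contrib
  by_cases hc : PySem.Set.contains pvs (pkey (valGet ns a) (valGet ns b)) = true
  · rw [if_pos hc]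
    by_cases hab' : a = b
    · subst hab'
      rw [if_pos rfl, mem_samePairs (pairwise_posOf ns _) p]
      simp only [mem_posOf]
      constructor
      · rintro ⟨⟨h10, h1n, h1v⟩, ⟨h20, h2n, h2v⟩, hlt⟩
        exact ⟨hc, h10, hlt, h2n, Or.inl ⟨h1v, h2v⟩⟩
      · rintro ⟨-, h10, hlt, h2n, (⟨h1v, h2v⟩ | ⟨h1v, h2v⟩)⟩ <;>
          exact ⟨⟨h10, by omega, h1v⟩, ⟨by omega, h2n, h2v⟩, hlt⟩
    · rw [if_neg hab']
      have hub : valGet ns a ≠ valGet ns b :=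
        fun h => hab' (valGet_inj ns ha0 (by omega) (by omega) hbm h)
      rw [mem_crossPairs]
      constructor
      · rintro ⟨i, hi, j, hj, hp⟩
        rw [mem_posOf] at hi hj
        obtain ⟨hi0, hin, hiv⟩ := hi
        obtain ⟨hj0, hjn, hjv⟩ := hj
        have hij : i ≠ j := fun h => hub (by rw [← hiv, ← hjv, h])
        by_cases hlt : i < j
        · rw [if_pos hlt] at hp; subst hp
          exact ⟨hc, hi0, hlt, hjn, Or.inl ⟨hiv, hjv⟩⟩
        · rw [if_neg hlt] at hp; subst hp
          exact ⟨hc, hj0, by omega, hin, Or.inr ⟨hjv, hiv⟩⟩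
      · rintro ⟨-, h10, hlt, h2n, (⟨h1v, h2v⟩ | ⟨h1v, h2v⟩)⟩
        · refine ⟨p.1, (mem_posOf ..).mpr ⟨h10, by omega, h1v⟩,
                  p.2, (mem_posOf ..).mpr ⟨by omega, h2n, h2v⟩, ?_⟩
          rw [if_pos hlt]
        · refine ⟨p.2, (mem_posOf ..).mpr ⟨by omega, h2n, h2v⟩,
                  p.1, (mem_posOf ..).mpr ⟨h10, by omega, h1v⟩, ?_⟩
          rw [if_neg (by omega)]
  · rw [if_neg hc]
    simp only [List.not_mem_nil, false_iff]
    rintro ⟨h, -⟩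
    exact hc h

lemma mem_hitsOf (ns pvs : List String) (p : Int × Int) :
    p ∈ hitsOf ns pvs ↔
      0 ≤ p.1 ∧ p.1 < p.2 ∧ p.2 < (ns.length : Int) ∧
      PySem.Set.contains pvs (keyAt ns p) = true := by
  unfold hitsOf
  simp only [List.mem_flatMap, PySem.List.mem_pyRange_one]
  constructor
  · rintro ⟨a, ⟨ha0, ham⟩, b, ⟨hab, hbm⟩, hp⟩
    rw [mem_contrib_iff ns pvs ha0 hab hbm p] at hp
    obtain ⟨hc, h10, hlt, h2n, hv⟩ := hp
    refine ⟨h10, hlt, h2n, ?_⟩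
    unfold keyAt
    rcases hv with ⟨h1, h2⟩ | ⟨h1, h2⟩
    · rw [h1, h2]; exact hc
    · rw [h1, h2, pkey_comm]; exact hc
  · rintro ⟨h10, hlt, h2n, hc⟩
    have hu : nsGet ns p.1 ∈ PySem.List.dedup ns :=
      (mem_dedup ..).mpr (nsGet_mem ns h10 (by omega))
    have hv : nsGet ns p.2 ∈ PySem.List.dedup ns :=
      (mem_dedup ..).mpr (nsGet_mem ns (by omega) h2n)
    obtain ⟨na, hna, hnae⟩ := List.getElem_of_mem hu
    obtain ⟨nb, hnb, hnbe⟩ := List.getElem_of_mem hv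
    have hva : valGet ns (na : Int) = nsGet ns p.1 := by
      rw [valGet_eq ns (by omega) (by simpa using hna)]; simpa using hnae
    have hvb : valGet ns (nb : Int) = nsGet ns p.2 := by
      rw [valGet_eq ns (by omega) (by simpa using hnb)]; simpa using hnbe
    rcases lt_trichotomy na nb with hnn | hnn | hnn
    · refine ⟨(na : Int), ⟨by omega, by exact_mod_cast hna⟩,
              (nb : Int), ⟨by exact_mod_cast hnn.le, by exact_mod_cast hnb⟩, ?_⟩
      rw [mem_contrib_iff ns pvs (by omega) (by exact_mod_cast hnn.le) (by exact_mod_cast hnb) p]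
      refine ⟨?_, h10, hlt, h2n, Or.inl ⟨hva.symm, hvb.symm⟩⟩
      unfold keyAt at hc
      rw [hva, hvb]; exact hc
    · subst hnn
      have huv : nsGet ns p.1 = nsGet ns p.2 := by rw [← hnae, ← hnbe]
      refine ⟨(na : Int), ⟨by omega, by exact_mod_cast hna⟩,
              (na : Int), ⟨le_refl _, by exact_mod_cast hna⟩, ?_⟩
      rw [mem_contrib_iff ns pvs (by omega) (le_refl _) (by exact_mod_cast hna) p]
      refine ⟨?_, h10, hlt, h2n, Or.inl ⟨hva.symm, by rw [hva]; exact huv.symm⟩⟩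
      unfold keyAt at hc
      rw [hva, huv]
      rw [huv] at hc
      exact hc
    · refine ⟨(nb : Int), ⟨by omega, by exact_mod_cast hnb⟩,
              (na : Int), ⟨by exact_mod_cast hnn.le, by exact_mod_cast hna⟩, ?_⟩
      rw [mem_contrib_iff ns pvs (by omega) (by exact_mod_cast hnn.le) (by exact_mod_cast hna) p]
      refine ⟨?_, h10, hlt, h2n, Or.inr ⟨hva.symm, hvb.symm⟩⟩
      unfold keyAt at hc
      rw [hva, hvb, pkey_comm]; exact hc



-- ---- nodup machinery ----
lemma nodup_of_pairwise_lexlt {l : List (Int × Int)}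
    (h : l.Pairwise (fun p q => toLex p < toLex q)) : l.Nodup :=
  h.imp (fun hlt heq => absurd (heq ▸ hlt) (lt_irrefl _))

lemma pairwise_samePairs {pu : List Int} (hpu : pu.Pairwise (· < ·)) :
    (samePairs pu).Pairwise (fun p q => toLex p < toLex q) := by
  have hmono := List.pairwise_iff_getElem.mp hpu
  unfold samePairs
  rw [List.pairwise_flatMap]
  constructor
  · intro x hx
    rw [PySem.List.mem_pyRange_one] at hx
    rw [List.pairwise_map]
    refine (PySem.List.pairwise_lt_pyRange_one _ _).imp_of_mem ?_
    intro y1 y2 hy1 hy2 hlt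
    rw [PySem.List.mem_pyRange_one] at hy1 hy2
    refine Prod.Lex.toLex_lt_toLex.mpr (Or.inr ⟨rfl, ?_⟩)
    have e1 : PySem.List.pyGetD pu y1 0 = pu[y1.toNat]'(by omega) :=
      PySem.List.pyGetD_eq_getElem pu 0 (by omega) (by omega)
    have e2 : PySem.List.pyGetD pu y2 0 = pu[y2.toNat]'(by omega) :=
      PySem.List.pyGetD_eq_getElem pu 0 (by omega) (by omega)
    simp only [e1, e2]
    exact hmono y1.toNat y2.toNat (by omega) (by omega) (by omega)
  · refine (PySem.List.pairwise_lt_pyRange_one _ _).imp_of_mem ?_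
    intro x1 x2 hx1 hx2 hlt p hp q hq
    rw [PySem.List.mem_pyRange_one] at hx1 hx2
    simp only [List.mem_map, PySem.List.mem_pyRange_one] at hp hq
    obtain ⟨y1, hy1, rfl⟩ := hp
    obtain ⟨y2, hy2, rfl⟩ := hq
    refine Prod.Lex.toLex_lt_toLex.mpr (Or.inl ?_)
    have e1 : PySem.List.pyGetD pu x1 0 = pu[x1.toNat]'(by omega) :=
      PySem.List.pyGetD_eq_getElem pu 0 (by omega) (by omega)
    have e2 : PySem.List.pyGetD pu x2 0 = pu[x2.toNat]'(by omega) :=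
      PySem.List.pyGetD_eq_getElem pu 0 (by omega) (by omega)
    simp only [e1, e2]
    exact hmono x1.toNat x2.toNat (by omega) (by omega) (by omega)

lemma nodup_crossPairs {pu pw : List Int} (hpu : pu.Nodup) (hpw : pw.Nodup)
    (hdisj : ∀ x ∈ pu, x ∉ pw) : (crossPairs pu pw).Nodup := by
  unfold crossPairs
  rw [List.nodup_flatMap]
  constructor
  · intro i hi
    refine List.Nodup.map_on ?_ hpw
    intro j1 h1 j2 h2 he
    split_ifs at he with t1 t2 t2 <;> simp only [Prod.mk.injEq] at he <;> omega
  · refine hpu.imp_of_mem ?_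
    intro i1 i2 hi1 hi2 hne p hp1 hp2
    simp only [List.mem_map] at hp1 hp2
    obtain ⟨j1, hj1, he1⟩ := hp1
    obtain ⟨j2, hj2, he2⟩ := hp2
    rw [← he2] at he1
    split_ifs at he1 with t1 t2 t2 <;> simp only [Prod.mk.injEq] at he1
    · exact hne (by omega)
    · exact hdisj i1 hi1 (by rw [he1.1]; exact hj2)
    · exact hdisj i2 hi2 (by rw [← he1.1]; exact hj1)
    · exact hne (by omega)

lemma nodup_contrib (ns pvs : List String) {a b : Int} (ha0 : 0 ≤ a) (hab : a ≤ b)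
    (hbm : b < ((PySem.List.dedup ns).length : Int)) :
    (contrib ns pvs a b).Nodup := by
  unfold contrib
  split_ifs with hc he
  · exact nodup_of_pairwise_lexlt (pairwise_samePairs (pairwise_posOf ns _))
  · refine nodup_crossPairs ((pairwise_posOf ns _).imp (fun h => ne_of_lt h))
      ((pairwise_posOf ns _).imp (fun h => ne_of_lt h)) ?_
    intro x hx hx'
    rw [mem_posOf] at hx hx'
    exact he (valGet_inj ns ha0 (by omega) (by omega) hbm (by rw [← hx.2.2, hx'.2.2]))
  · exact List.nodup_nil

lemma contrib_disjoint (ns pvs : List String) {a b a' b' : Int}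
    (ha0 : 0 ≤ a) (hab : a ≤ b) (hbm : b < ((PySem.List.dedup ns).length : Int))
    (ha0' : 0 ≤ a') (hab' : a' ≤ b') (hbm' : b' < ((PySem.List.dedup ns).length : Int))
    (hne : ¬(a = a' ∧ b = b')) :
    List.Disjoint (contrib ns pvs a b) (contrib ns pvs a' b') := by
  intro p hp hp'
  rw [mem_contrib_iff ns pvs ha0 hab hbm p] at hp
  rw [mem_contrib_iff ns pvs ha0' hab' hbm' p] at hp'
  obtain ⟨-, -, -, -, hv⟩ := hp
  obtain ⟨-, -, -, -, hv'⟩ := hp'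
  rcases hv with ⟨h1, h2⟩ | ⟨h1, h2⟩ <;> rcases hv' with ⟨h1', h2'⟩ | ⟨h1', h2'⟩
  · have e1 : a = a' := valGet_inj ns ha0 (by omega) ha0' (by omega) (by rw [← h1, h1'])
    have e2 : b = b' := valGet_inj ns (by omega) hbm (by omega) hbm' (by rw [← h2, h2'])
    exact hne ⟨e1, e2⟩
  · have e1 : a = b' := valGet_inj ns ha0 (by omega) (by omega) hbm' (by rw [← h1, h1'])
    have e2 : b = a' := valGet_inj ns (by omega) hbm ha0' (by omega) (by rw [← h2, h2'])
    exact hne (by omega)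
  · have e1 : b = a' := valGet_inj ns (by omega) hbm ha0' (by omega) (by rw [← h1, h1'])
    have e2 : a = b' := valGet_inj ns ha0 (by omega) (by omega) hbm' (by rw [← h2, h2'])
    exact hne (by omega)
  · have e1 : b = b' := valGet_inj ns (by omega) hbm (by omega) hbm' (by rw [← h1, h1'])
    have e2 : a = a' := valGet_inj ns ha0 (by omega) ha0' (by omega) (by rw [← h2, h2'])
    exact hne ⟨e2, e1⟩

lemma nodup_keptPairs (ns pvs : List String) : (keptPairs ns pvs).Nodup :=
  nodup_of_pairwise_lexlt (pairwise_keptPairs ns pvs)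

lemma nodup_hitsOf (ns pvs : List String) : (hitsOf ns pvs).Nodup := by
  unfold hitsOf
  rw [List.nodup_flatMap]
  constructor
  · intro a ha
    rw [PySem.List.mem_pyRange_one] at ha
    rw [List.nodup_flatMap]
    constructor
    · intro b hb
      rw [PySem.List.mem_pyRange_one] at hb
      exact nodup_contrib ns pvs ha.1 hb.1 hb.2
    · refine (PySem.List.pairwise_lt_pyRange_one _ _).imp_of_mem ?_
      intro b1 b2 hb1 hb2 hlt
      rw [PySem.List.mem_pyRange_one] at hb1 hb2
      exact contrib_disjoint ns pvs ha.1 hb1.1 hb1.2 ha.1 hb2.1 hb2.2 (by omega)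
  · refine (PySem.List.pairwise_lt_pyRange_one _ _).imp_of_mem ?_
    intro a1 a2 ha1 ha2 hlt p hp1 hp2
    rw [PySem.List.mem_pyRange_one] at ha1 ha2
    simp only [List.mem_flatMap, PySem.List.mem_pyRange_one] at hp1 hp2
    obtain ⟨b1, hb1, hpb1⟩ := hp1
    obtain ⟨b2, hb2, hpb2⟩ := hp2
    exact contrib_disjoint ns pvs ha1.1 hb1.1 hb1.2 ha2.1 hb2.1 hb2.2 (by omega) hpb1 hpb2


-- ---- the sort step ----
lemma sorted2_eq_sorted_lex (xs : List (Int × Int)) :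
    PySem.List.sorted2 xs Prod.fst Prod.snd = PySem.List.sorted xs (fun p => toLex p) := by
  have hB : (fun (p q : Int × Int) =>
      (decide (p.1 < q.1) || (!decide (q.1 < p.1) && decide (p.2 < q.2)))) =
      (fun (p q : Int × Int) => decide (toLex p < toLex q)) := by
    funext p q
    rw [Bool.eq_iff_iff]
    simp only [Bool.or_eq_true, Bool.and_eq_true, Bool.not_eq_true', decide_eq_true_eq,
      decide_eq_false_iff_not, Prod.Lex.toLex_lt_toLex]
    omega
  simp only [PySem.List.sorted2, PySem.List.sorted, Bool.false_eq_true, if_false]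
  rw [hB]


lemma sorted_hitsOf (ns pvs : List String) :
    PySem.List.sorted2 (hitsOf ns pvs) Prod.fst Prod.snd = keptPairs ns pvs := by
  rw [sorted2_eq_sorted_lex]
  refine PySem.List.sorted_eq_of_perm_of_pairwise_lt _ _ _ ?_ (pairwise_keptPairs ns pvs)
  refine (List.perm_ext_iff_of_nodup (nodup_keptPairs ns pvs) (nodup_hitsOf ns pvs)).mpr ?_
  intro p
  rw [mem_keptPairs, mem_hitsOf]


-- ---- B's computation in closed form ----

lemma ite_append_left {c : Prop} [Decidable c] (l X Y : List (Int × Int)) :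
    (if c then l ++ X else l ++ Y) = l ++ (if c then X else Y) := by
  split <;> rfl

lemma ite_append_nil {c : Prop} [Decidable c] (l X : List (Int × Int)) :
    (if c then l ++ X else l) = l ++ (if c then X else []) := by
  split <;> simp

lemma positions_get (ns : List String) {a : Int} (h0 : 0 ≤ a)
    (h1 : a < ((PySem.List.dedup ns).length : Int)) :
    PySem.List.pyGetD ((PySem.List.dedup ns).map (fun u =>
        (PySem.List.pyRange 0 (ns.length : Int) 1).filter
          (fun i => PySem.List.pyGetD ns i "" == u))) a []
      = posOf ns (valGet ns a) := by
  rw [PySem.List.pyGetD_eq_getElem _ _ h0 (by simpa using h1), List.getElem_map,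
      valGet_eq ns h0 (by omega)]
  rfl

lemma B_shape (ns pvs : List String) :
    (let vals := PySem.List.dedup ns
    let positions := vals.map (fun u =>
      (PySem.List.pyRange 0 (PySem.List.len ns) 1).filter (fun i => PySem.List.pyGetD ns i "" == u))
    let hits := (PySem.List.pyRange 0 (PySem.List.len vals) 1).foldl (fun hits a =>
      (PySem.List.pyRange a (PySem.List.len vals) 1).foldl (fun hits b =>
        let u := PySem.List.pyGetD vals a ""
        let v := PySem.List.pyGetD vals b ""
        let key := pkey u v
        if PySem.Set.contains pvs key then
          let pu := PySem.List.pyGetD positions a []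
          let pv := PySem.List.pyGetD positions b []
          if a == b then
            (PySem.List.pyRange 0 (PySem.List.len pu) 1).foldl (fun hits x =>
              (PySem.List.pyRange (x + 1) (PySem.List.len pu) 1).foldl (fun hits y =>
                hits ++ [(PySem.List.pyGetD pu x 0, PySem.List.pyGetD pu y 0)]) hits) hits
          else
            pu.foldl (fun hits i =>
              pv.foldl (fun hits j =>
                hits ++ [if i < j then (i, j) else (j, i)]) hits) hits
        else hits) hits) ([] : List (Int × Int))
    let sortedHits := PySem.List.sorted2 hits Prod.fst Prod.snd
    sortedHits.foldl (fun out p =>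
      out ++ [pkey (PySem.List.pyGetD ns p.1 "") (PySem.List.pyGetD ns p.2 "")]) [])
    = (PySem.List.sorted2 (hitsOf ns pvs) Prod.fst Prod.snd).map (keyAt ns) := by
  simp only [PySem.List.len_eq, PySem.List.foldl_append_singleton_eq_map,
    PySem.List.foldl_append_eq_flatMap, ite_append_left, ite_append_nil, List.nil_append,
    beq_iff_eq]
  congr 1
  congr 1
  unfold hitsOf
  refine List.flatMap_congr ?_
  intro a ha
  refine List.flatMap_congr ?_
  intro b hb
  rw [PySem.List.mem_pyRange_one] at ha hb
  rw [positions_get ns ha.1 (by omega), positions_get ns (by omega) hb.2]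
  unfold contrib valGet samePairs crossPairs
  rfl


-- ===== VERDICT (by name: the statement is the Claim_ definition above) =====
theorem parelles_detectades_py_spec : Claim_equal_parelles_detectades_py := by
  intro ingredients pvs _
  unfold Spec_parelles_detectades_py parelles_detectades_py parelles_detectades_py_alt
  by_cases hpv : pvs = []
  · simp [hpv]
  · simp only [if_neg hpv]
    rw [A_shape, B_shape, sorted_hitsOf]
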